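-- pv_equiv track=rewrite | github.com/delaila5888749dhah/lush-worker-selector-devlush | ci/check_blueprint_contracts.py | _summarize_pytest_output
-- ===== SOURCE A (Python) =====
-- def _summarize_pytest_output(output: str) -> str:
--     """Extract a short, one-line summary from pytest output (best-effort)."""
--     if not output:
--         return ""
--     # Look for the pytest short summary line, e.g. "FAILED tests/x.py::Class::m - AssertionError"
--     for line in output.splitlines():
--         stripped = line.strip()
--         if stripped.startswith(("FAILED ", "ERROR ")):
--             return stripped[:200]
--     # Fallback: last non-empty line of output
--     for line in reversed(output.splitlines()):
--         stripped = line.strip()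
--         if stripped:
--             return stripped[:200]
--     return ""
-- ===== SOURCE B (Python) =====
-- def _summarize_pytest_output(output: str) -> str:
--     """One forward pass: early-return on FAILED/ERROR, else remember last non-empty line."""
--     last_nonempty = ""
--     for line in output.splitlines():
--         stripped = line.strip()
--         if stripped.startswith(("FAILED ", "ERROR ")):
--             return stripped[:200]
--         if stripped:
--             last_nonempty = stripped
--     return last_nonempty[:200]
-- ===== Notes on version B (the rewrite author's own statement) =====
-- stated objective: simpler
-- what changed: Replaced A's two passes (forward scan for FAILED/ERROR, then a scan over the reversed lines for the last non-empty) by one forward pass with a last-non-empty accumulator, dropping the empty-string guard.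
import Mathlib
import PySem

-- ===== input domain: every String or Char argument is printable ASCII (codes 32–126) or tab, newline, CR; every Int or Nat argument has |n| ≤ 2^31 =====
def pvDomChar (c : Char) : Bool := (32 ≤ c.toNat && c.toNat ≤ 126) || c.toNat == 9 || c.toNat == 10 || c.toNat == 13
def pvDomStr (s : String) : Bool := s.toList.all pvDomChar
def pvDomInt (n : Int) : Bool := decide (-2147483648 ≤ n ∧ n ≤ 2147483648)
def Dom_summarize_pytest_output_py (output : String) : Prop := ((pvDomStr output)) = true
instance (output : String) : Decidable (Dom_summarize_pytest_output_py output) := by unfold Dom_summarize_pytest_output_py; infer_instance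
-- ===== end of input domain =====

-- One honest line: B replaces A's forward-then-reversed two-pass structure by a single
-- forward pass with a last-non-empty accumulator (same cost; simpler).

-- ===== PORT A =====
-- first loop of A: early return of stripped[:200] on a FAILED/ERROR line
def pvAScan : List String → Option String
  | [] => none
  | l :: ls =>
    let stripped := PySem.Str.strip l
    if PySem.Str.startswith stripped "FAILED " || PySem.Str.startswith stripped "ERROR " then
      some (PySem.Str.slice stripped none (some 200))
    else pvAScan ls

-- second loop of A (applied to the reversed line list): first non-empty stripped line
def pvAFallback : List String → Option String
  | [] => none
  | l :: ls =>
    let stripped := PySem.Str.strip l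
    if stripped == "" then pvAFallback ls
    else some (PySem.Str.slice stripped none (some 200))

def summarize_pytest_output_py (output : String) : String :=
  if output == "" then ""
  else
    match pvAScan (PySem.Str.splitlines output) with
    | some r => r
    | none =>
      match pvAFallback (PySem.Str.splitlines output).reverse with
      | some r => r
      | none => ""

-- ===== PORT B =====
-- single forward pass: early return on FAILED/ERROR, else keep last non-empty stripped line
def pvBLoop : List String → String → String
  | [], last_nonempty => PySem.Str.slice last_nonempty none (some 200)
  | l :: ls, last_nonempty =>
    let stripped := PySem.Str.strip l
    if PySem.Str.startswith stripped "FAILED " || PySem.Str.startswith stripped "ERROR " then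
      PySem.Str.slice stripped none (some 200)
    else if stripped == "" then pvBLoop ls last_nonempty
    else pvBLoop ls stripped

def summarize_pytest_output_py_alt (output : String) : String :=
  pvBLoop (PySem.Str.splitlines output) ""

-- ===== PRECONDITION & SPEC =====
def Spec_summarize_pytest_output_py (output : String) (out : String) : Prop := out = summarize_pytest_output_py_alt output
instance (output : String) (out : String) : Decidable (Spec_summarize_pytest_output_py output out) := by unfold Spec_summarize_pytest_output_py; infer_instance

-- ===== CLAIM (what is proved, stated in full; the proofs are below) =====
def Claim_equal_summarize_pytest_output_py : Prop := ∀ (output : String), Dom_summarize_pytest_output_py output → Spec_summarize_pytest_output_py output (summarize_pytest_output_py output)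

-- ===== LEMMAS AND PROOFS =====

theorem pvAFallback_append (xs ys : List String) :
    pvAFallback (xs ++ ys) = (pvAFallback xs).orElse (fun _ => pvAFallback ys) := by
  induction xs with
  | nil => simp [pvAFallback]
  | cons l ls ih =>
    simp only [List.cons_append, pvAFallback]
    split_ifs with h
    · exact ih
    · rfl

theorem pvBLoop_eq (ls : List String) (last : String) :
    pvBLoop ls last =
      match pvAScan ls with
      | some r => r
      | none =>
        match pvAFallback ls.reverse with
        | some r => r
        | none => PySem.Str.slice last none (some 200) := by
  induction ls generalizing last with
  | nil => simp [pvBLoop, pvAScan, pvAFallback]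
  | cons l ls ih =>
    simp only [pvBLoop, pvAScan, List.reverse_cons, pvAFallback_append]
    split_ifs with h1 h2
    · rfl
    · rw [ih]
      cases pvAScan ls with
      | some r => rfl
      | none =>
        cases pvAFallback ls.reverse with
        | some r => rfl
        | none => simp [pvAFallback, Option.orElse, h2]
    · rw [ih]
      cases pvAScan ls with
      | some r => rfl
      | none =>
        cases pvAFallback ls.reverse with
        | some r => rfl
        | none => simp [pvAFallback, Option.orElse, h2]

theorem pvSplitlines_empty : PySem.Str.splitlines "" = [] := by decide

theorem pvSlice_empty : PySem.Str.slice "" none (some 200) = "" := by decide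

-- ===== VERDICT (by name: the statement is the Claim_ definition above) =====
theorem summarize_pytest_output_py_spec : Claim_equal_summarize_pytest_output_py := by
  intro output _
  unfold Spec_summarize_pytest_output_py summarize_pytest_output_py summarize_pytest_output_py_alt
  rw [pvBLoop_eq]
  by_cases h : output = ""
  · subst h
    simp [pvSplitlines_empty, pvAScan, pvAFallback, pvSlice_empty]
  · have hb : (output == "") = false := by simp [h]
    rw [hb]
    simp only [Bool.false_eq_true, if_false]
    cases pvAScan (PySem.Str.splitlines output) with
    | some r => rfl
    | none =>
      cases pvAFallback (PySem.Str.splitlines output).reverse with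
      | some r => rfl
      | none => exact pvSlice_empty.symm
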